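-- pv_equiv track=rewrite | github.com/geekyWomaniya/PythonLearn | PythonProgrammingExpert/PythonFundamentals/Assesment4.py | get_n_longest_unique_words
-- ===== SOURCE A (Python) =====
-- def get_n_longest_unique_words(words, n):
--     unique_words = []
--     for word in words:
--         if words.count(word) < 2:
--             unique_words.append(word)
--     unique_words.sort(key=len, reverse= True)
--     n_unique_word = unique_words[:n]
--     return n_unique_word
-- ===== SOURCE B (Python) =====
-- def get_n_longest_unique_words(words, n):
--     counts = {}
--     for w in words:
--         counts[w] = counts.get(w, 0) + 1
--     buckets = {}
--     for w in words:
--         if counts[w] == 1: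
--             buckets.setdefault(len(w), []).append(w)
--     result = []
--     for L in sorted(buckets, reverse=True):
--         result += buckets[L]
--     return result[:n]
-- ===== Notes on version B (the rewrite author's own statement) =====
-- stated objective: faster
-- what changed: Replaces the quadratic words.count scan per element with a one-pass count dict, and replaces the stable reverse sort of the words with length buckets concatenated in descending key order.
import Mathlib
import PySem

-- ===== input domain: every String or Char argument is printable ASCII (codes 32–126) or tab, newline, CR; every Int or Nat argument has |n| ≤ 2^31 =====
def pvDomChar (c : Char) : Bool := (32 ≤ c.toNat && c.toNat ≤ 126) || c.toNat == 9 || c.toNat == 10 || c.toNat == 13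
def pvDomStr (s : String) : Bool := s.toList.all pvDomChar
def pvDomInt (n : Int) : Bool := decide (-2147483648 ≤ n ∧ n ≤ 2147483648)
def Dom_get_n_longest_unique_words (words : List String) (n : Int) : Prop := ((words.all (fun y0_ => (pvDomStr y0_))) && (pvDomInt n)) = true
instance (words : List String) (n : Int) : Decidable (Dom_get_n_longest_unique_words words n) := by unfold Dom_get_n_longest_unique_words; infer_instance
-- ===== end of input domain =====

-- B replaces A's quadratic words.count scan with a one-pass count dict and A's stable reverse
-- sort with length buckets concatenated in descending key order (objective: faster).
-- ===== PORT A =====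
def get_n_longest_unique_words (words : List String) (n : Int) : List String :=
  -- unique_words = []; for word in words: if words.count(word) < 2: unique_words.append(word)
  let unique_words : List String :=
    words.foldl (fun acc word => if PySem.List.count words word < 2 then acc ++ [word] else acc) []
  -- unique_words.sort(key=len, reverse=True)
  let sorted_u := PySem.List.sorted unique_words (fun w => PySem.Str.len w) true
  -- n_unique_word = unique_words[:n]
  PySem.List.slice sorted_u none (some n)

-- ===== PORT B =====
def get_n_longest_unique_words_alt (words : List String) (n : Int) : List String :=
  -- counts = {}; for w in words: counts[w] = counts.get(w, 0) + 1
  let counts : PySem.Dict String Int :=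
    words.foldl (fun d w => d.insert w (d.getD w 0 + 1)) PySem.Dict.empty
  -- buckets = {}; for w in words: if counts[w] == 1: buckets.setdefault(len(w), []).append(w)
  -- (setdefault-then-append updates buckets[len(w)] to buckets.get(len(w), []) + [w] in place: Dict.modify)
  let buckets : PySem.Dict Int (List String) :=
    words.foldl (fun d w => if counts.getD w 0 == 1 then d.modify (PySem.Str.len w) [] (· ++ [w]) else d)
      PySem.Dict.empty
  -- result = []; for L in sorted(buckets, reverse=True): result += buckets[L]
  let result : List String :=
    (PySem.List.sorted buckets.keys (fun k => k) true).foldl (fun acc L => acc ++ buckets.getD L []) []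
  -- return result[:n]
  PySem.List.slice result none (some n)

-- ===== PRECONDITION & SPEC =====
def Spec_get_n_longest_unique_words (words : List String) (n : Int) (out : List String) : Prop := out = get_n_longest_unique_words_alt words n
instance (words : List String) (n : Int) (out : List String) : Decidable (Spec_get_n_longest_unique_words words n out) := by unfold Spec_get_n_longest_unique_words; infer_instance

-- ===== CLAIM (what is proved, stated in full; the proofs are below) =====
def Claim_equal_get_n_longest_unique_words : Prop := ∀ (words : List String) (n : Int), Dom_get_n_longest_unique_words words n → Spec_get_n_longest_unique_words words n (get_n_longest_unique_words words n)

-- ===== LEMMAS AND PROOFS =====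

-- insert a key into a strictly descending list of distinct keys
def keyIns : List Int → Int → List Int
  | [], a => [a]
  | k :: t, a => if k < a then a :: k :: t else if a = k then k :: t else k :: keyIns t a

-- the distinct keys of xs, strictly descending
def keysOf {α : Type} (key : α → Int) (xs : List α) : List Int :=
  (xs.map key).foldl keyIns []

-- concatenation of the key-buckets of p in the order of ks
def FB {α : Type} (key : α → Int) (ks : List Int) (p : List α) : List α :=
  ks.flatMap (fun k => p.filter (fun w => key w == k))

theorem mem_keyIns (ks : List Int) (b a : Int) : a ∈ keyIns ks b ↔ a = b ∨ a ∈ ks := by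
  induction ks with
  | nil => simp [keyIns]
  | cons k t ih =>
    simp only [keyIns]
    split_ifs with h1 h2
    · simp only [List.mem_cons]
    · subst h2; simp only [List.mem_cons]; tauto
    · simp only [List.mem_cons, ih]; tauto

theorem pairwise_gt_keyIns (ks : List Int) (b : Int) (h : ks.Pairwise (· > ·)) :
    (keyIns ks b).Pairwise (· > ·) := by
  induction ks with
  | nil => simp [keyIns]
  | cons k t ih =>
    rw [List.pairwise_cons] at h
    by_cases h1 : k < b
    · simp only [keyIns, if_pos h1]
      refine List.pairwise_cons.2 ⟨?_, List.pairwise_cons.2 ⟨h.1, h.2⟩⟩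
      intro a ha
      rcases List.mem_cons.1 ha with rfl | ha
      · exact h1
      · exact lt_trans (h.1 a ha) h1
    · by_cases h2 : b = k
      · simp only [keyIns, if_neg h1, if_pos h2]
        exact List.pairwise_cons.2 ⟨h.1, h.2⟩
      · simp only [keyIns, if_neg h1, if_neg h2]
        refine List.pairwise_cons.2 ⟨?_, ih h.2⟩
        intro a ha
        rcases (mem_keyIns t b a).1 ha with rfl | ha
        · omega
        · exact h.1 a ha

theorem mem_foldl_keyIns (l : List Int) (acc : List Int) (a : Int) :
    a ∈ l.foldl keyIns acc ↔ a ∈ acc ∨ a ∈ l := by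
  induction l generalizing acc with
  | nil => simp
  | cons x t ih =>
    rw [List.foldl_cons, ih, mem_keyIns]
    simp; tauto

theorem pairwise_gt_foldl_keyIns (l : List Int) (acc : List Int) (h : acc.Pairwise (· > ·)) :
    (l.foldl keyIns acc).Pairwise (· > ·) := by
  induction l generalizing acc with
  | nil => exact h
  | cons x t ih => exact ih _ (pairwise_gt_keyIns acc x h)

theorem insertBy_skip {α : Type} (bef : α → α → Bool) (x : α) (l1 l2 : List α)
    (h : ∀ y ∈ l1, bef x y = false) :
    PySem.List.insertBy bef x (l1 ++ l2) = l1 ++ PySem.List.insertBy bef x l2 := by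
  induction l1 with
  | nil => simp
  | cons y t ih =>
    have hy : bef x y = false := h y (by simp)
    rw [List.cons_append, PySem.List.insertBy, hy]
    simp only [Bool.false_eq_true, if_false]
    rw [ih (fun z hz => h z (by simp [hz]))]
    simp

theorem insertBy_front {α : Type} (bef : α → α → Bool) (x : α) (l : List α)
    (h : ∀ y ∈ l, bef x y = true) :
    PySem.List.insertBy bef x l = x :: l := by
  cases l with
  | nil => rfl
  | cons y t => simp [PySem.List.insertBy, h y (by simp)]

theorem filter_key_append_ne {α : Type} (key : α → Int) (p : List α) (x : α) (k : Int)
    (h : key x ≠ k) :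
    (p ++ [x]).filter (fun w => key w == k) = p.filter (fun w => key w == k) := by
  rw [List.filter_append]
  simp [h]

theorem filter_key_append_self {α : Type} (key : α → Int) (p : List α) (x : α) :
    (p ++ [x]).filter (fun w => key w == key x) = p.filter (fun w => key w == key x) ++ [x] := by
  rw [List.filter_append]
  simp

theorem mem_FB_key_lt {α : Type} (key : α → Int) (k : Int) (t : List Int) (p : List α)
    (hdesc : (k :: t).Pairwise (· > ·)) (y : α) (hy : y ∈ FB key (k :: t) p) :
    key y ≤ k := by
  rw [List.pairwise_cons] at hdesc
  simp only [FB, List.mem_flatMap, List.mem_filter] at hy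
  obtain ⟨k', hk', _, hky⟩ := hy
  have hyk : key y = k' := by simpa using hky
  rcases List.mem_cons.1 hk' with rfl | hk'
  · omega
  · have := hdesc.1 _ hk'; omega

theorem insertBy_FB {α : Type} (key : α → Int) (x : α) (p : List α) (ks : List Int)
    (hdesc : ks.Pairwise (· > ·))
    (hcov : key x ∉ ks → p.filter (fun w => key w == key x) = []) :
    PySem.List.insertBy (fun a b => decide (key b < key a)) x (FB key ks p)
      = FB key (keyIns ks (key x)) (p ++ [x]) := by
  induction ks with
  | nil =>
    have hp : p.filter (fun w => key w == key x) = [] := hcov (by simp)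
    simp [FB, keyIns, hp, PySem.List.insertBy]
  | cons k t ih =>
    have hdesc' := List.pairwise_cons.1 hdesc
    by_cases h1 : k < key x
    · -- new maximal key: x goes to the front
      rw [insertBy_front _ _ _ (fun y hy => by
        have := mem_FB_key_lt key k t p hdesc y hy
        simp; omega)]
      have hxf : p.filter (fun w => key w == key x) = [] := by
        apply hcov
        intro hmem
        rcases List.mem_cons.1 hmem with rfl | hmem
        · omega
        · have := hdesc'.1 _ hmem; omega
      have ht : List.flatMap (fun k' => List.filter (fun w => key w == k') (p ++ [x])) t
          = List.flatMap (fun k' => List.filter (fun w => key w == k') p) t :=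
        List.flatMap_congr (fun k' hk' => filter_key_append_ne key p x k'
          (by have := hdesc'.1 _ hk'; omega))
      simp only [keyIns, if_pos h1, FB, List.flatMap_cons]
      rw [filter_key_append_self, hxf, filter_key_append_ne key p x k (by omega), ht]
      simp
    · by_cases h2 : key x = k
      · -- same key as the head bucket: x is appended at its end
        simp only [keyIns, if_neg h1, if_pos h2, FB, List.flatMap_cons]
        rw [insertBy_skip _ _ _ _ (fun y hy => by
          have hyk : key y = k := by simpa using (List.mem_filter.1 hy).2
          simp; omega)]
        rw [insertBy_front _ _ _ (fun y hy => by
          simp only [List.mem_flatMap, List.mem_filter] at hy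
          obtain ⟨k', hk', _, hky⟩ := hy
          have hyk : key y = k' := by simpa using hky
          have := hdesc'.1 _ hk'
          simp; omega)]
        have hb : (p ++ [x]).filter (fun w => key w == k) = p.filter (fun w => key w == k) ++ [x] := by
          rw [← h2]; exact filter_key_append_self key p x
        have ht : List.flatMap (fun k' => List.filter (fun w => key w == k') (p ++ [x])) t
            = List.flatMap (fun k' => List.filter (fun w => key w == k') p) t :=
          List.flatMap_congr (fun k' hk' => filter_key_append_ne key p x k'
            (by have := hdesc'.1 _ hk'; omega))
        rw [hb, ht]
        simp
      · -- key x < k: skip the head bucket and recurse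
        simp only [keyIns, if_neg h1, if_neg h2, FB, List.flatMap_cons]
        rw [insertBy_skip _ _ _ _ (fun y hy => by
          have hyk : key y = k := by simpa using (List.mem_filter.1 hy).2
          simp; omega)]
        rw [filter_key_append_ne key p x k (by omega)]
        have hcov' : key x ∉ t → p.filter (fun w => key w == key x) = [] := by
          intro ht
          apply hcov
          intro hmem
          rcases List.mem_cons.1 hmem with rfl | hmem
          · omega
          · exact ht hmem
        have hrec := ih hdesc'.2 hcov'
        simp only [FB] at hrec
        rw [hrec]

theorem sorted_eq_FB {α : Type} (key : α → Int) (xs : List α) :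
    PySem.List.sorted xs key true = FB key (keysOf key xs) xs := by
  rw [PySem.List.sorted_rev_eq_foldl_insertBy]
  induction xs using List.reverseRecOn with
  | nil => simp [FB, keysOf]
  | append_singleton xs x ih =>
    rw [List.foldl_append, List.foldl_cons, List.foldl_nil, ih]
    rw [insertBy_FB key x xs (keysOf key xs)
      (pairwise_gt_foldl_keyIns _ _ (by simp))
      (by
        intro hnot
        rw [List.filter_eq_nil_iff]
        intro w hw hkey
        apply hnot
        rw [keysOf, mem_foldl_keyIns]
        right
        rw [List.mem_map]
        exact ⟨w, hw, by simpa using hkey.symm⟩)]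
    congr 1
    rw [keysOf, keysOf, List.map_append, List.foldl_append]
    rfl

theorem count_cond_eq (c : Nat) (hc : 0 < c) : decide (c < 2) = ((c : Int) == 1) := by
  by_cases h : c = 1
  · subst h; simp
  · have h2 : ¬ c < 2 := by omega
    have h3 : ((c : Int)) ≠ 1 := by exact_mod_cast h
    simp [h2, h3]

theorem pre_slice_eq (words : List String) (counts : PySem.Dict String Int)
    (hcounts : counts = words.foldl (fun d w => d.insert w (d.getD w 0 + 1)) PySem.Dict.empty)
    (buckets : PySem.Dict Int (List String))
    (hbuckets : buckets = words.foldl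
      (fun d w => if counts.getD w 0 == 1 then d.modify (PySem.Str.len w) [] (· ++ [w]) else d)
      PySem.Dict.empty) :
    PySem.List.sorted
        (words.foldl (fun acc word => if PySem.List.count words word < 2 then acc ++ [word] else acc) [])
        (fun w => PySem.Str.len w) true
      = (PySem.List.sorted buckets.keys (fun k => k) true).foldl
          (fun acc L => acc ++ buckets.getD L []) [] := by
  -- A side: the loop is a filter
  rw [PySem.List.foldl_append_ite_eq_filter, List.nil_append]
  have hfilt : words.filter (fun word => decide (PySem.List.count words word < 2))
      = words.filter (fun w => counts.getD w 0 == 1) := by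
    apply List.filter_congr
    intro w hw
    rw [hcounts, PySem.Dict.getD_foldl_insert_add_one]
    have hpos : 0 < words.count w := List.count_pos_iff.2 hw
    rw [PySem.List.count_eq, PySem.Dict.getD_empty, zero_add]
    exact count_cond_eq (words.count w) hpos
  rw [hfilt]
  -- B side: the bucket loop is a fold over the filtered list
  rw [hbuckets, PySem.List.foldl_if_eq_foldl_filter]
  set U : List String := words.filter (fun w => counts.getD w 0 == 1) with hU
  -- the bucket dict: keys and lookups
  have hkeys : (U.foldl (fun d w => d.modify (PySem.Str.len w) [] (· ++ [w])) PySem.Dict.empty).keys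
      = PySem.Set.ofList (U.map (fun w => PySem.Str.len w)) := by
    rw [PySem.Dict.keys_foldl_modify_key (l := U) (key := fun w => PySem.Str.len w)
      (d0 := ([] : List String)) (f := fun _ w => (· ++ [w])) (d := PySem.Dict.empty)]
    rfl
  have hgetD : ∀ L : Int,
      (U.foldl (fun d w => d.modify (PySem.Str.len w) [] (· ++ [w])) PySem.Dict.empty).getD L []
        = U.filter (fun w => PySem.Str.len w == L) := by
    intro L
    rw [show (U.foldl (fun d w => PySem.Dict.modify d (PySem.Str.len w) [] (· ++ [w])) PySem.Dict.empty)
        = ((U.map (fun w => (PySem.Str.len w, w))).foldl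
            (fun d p => PySem.Dict.modify d p.1 [] (· ++ [p.2])) PySem.Dict.empty) from
      (List.foldl_map (f := fun w => (PySem.Str.len w, w))
        (g := fun d p => PySem.Dict.modify d p.1 [] (· ++ [p.2]))).symm]
    rw [PySem.Dict.getD_foldl_modify_append, PySem.Dict.getD_empty, List.nil_append,
      List.filter_map, List.map_map]
    simp [Function.comp_def]
  -- the sorted keys are the strictly descending distinct lengths
  have hlens : PySem.List.sorted
      (U.foldl (fun d w => d.modify (PySem.Str.len w) [] (· ++ [w])) PySem.Dict.empty).keys
      (fun k => k) true = keysOf (fun w => PySem.Str.len w) U := by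
    rw [hkeys]
    apply PySem.List.sorted_rev_eq_of_perm_of_pairwise_gt
    · have h1 : (keysOf (fun w => PySem.Str.len w) U).Nodup :=
        (pairwise_gt_foldl_keyIns _ _ (by simp)).imp (fun h => ne_of_gt h)
      have h2 := PySem.Set.nodup_ofList (U.map (fun w => PySem.Str.len w))
      rw [List.perm_ext_iff_of_nodup h1 h2]
      intro a
      rw [PySem.Set.mem_ofList, keysOf, mem_foldl_keyIns]
      simp
    · exact (pairwise_gt_foldl_keyIns _ _ (by simp)).imp (fun h => h)
  rw [PySem.List.foldl_append_eq_flatMap, List.nil_append, hlens]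
  have hflat : (keysOf (fun w => PySem.Str.len w) U).flatMap
      (fun L => (U.foldl (fun d w => d.modify (PySem.Str.len w) [] (· ++ [w])) PySem.Dict.empty).getD L [])
      = (keysOf (fun w => PySem.Str.len w) U).flatMap
          (fun L => U.filter (fun w => PySem.Str.len w == L)) :=
    List.flatMap_congr (fun L _ => hgetD L)
  rw [hflat]
  simpa [FB] using sorted_eq_FB (fun w => PySem.Str.len w) U

-- ===== VERDICT (by name: the statement is the Claim_ definition above) =====
theorem get_n_longest_unique_words_spec : Claim_equal_get_n_longest_unique_words := by
  intro words n _
  unfold Spec_get_n_longest_unique_words get_n_longest_unique_words get_n_longest_unique_words_alt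
  exact congrArg (fun l => PySem.List.slice l none (some n))
    (pre_slice_eq words _ rfl _ rfl)
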